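-- pv_equiv track=rewrite | github.com/Vangardo/mcp_hub | app/integrations/figma/css_extractor.py | _css_to_str
-- ===== SOURCE A (Python) =====
-- def _css_to_str(css: dict[str, str]) -> str:
--     if not css:
--         return ""
--     # Order CSS properties logically
--     order = [
--         "display", "flex-direction", "flex-wrap", "justify-content", "align-items",
--         "gap", "width", "height", "padding", "margin",
--         "background-color", "background", "color",
--         "font-family", "font-size", "font-weight", "line-height",
--         "letter-spacing", "text-align", "text-decoration", "text-transform",
--         "border", "border-radius", "box-shadow",
--         "opacity", "overflow", "filter", "backdrop-filter",
--     ]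
--     ordered = []
--     for prop in order:
--         if prop in css:
--             ordered.append(f"{prop}: {css[prop]}")
--     # Any remaining
--     for prop, val in css.items():
--         if prop not in order:
--             ordered.append(f"{prop}: {val}")
--     return "; ".join(ordered)
-- ===== SOURCE B (Python) =====
-- def _css_to_str(css: dict[str, str]) -> str:
--     order = [
--         "display", "flex-direction", "flex-wrap", "justify-content", "align-items",
--         "gap", "width", "height", "padding", "margin",
--         "background-color", "background", "color",
--         "font-family", "font-size", "font-weight", "line-height",
--         "letter-spacing", "text-align", "text-decoration", "text-transform",
--         "border", "border-radius", "box-shadow",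
--         "opacity", "overflow", "filter", "backdrop-filter",
--     ]
--     rank = {p: i for i, p in enumerate(order)}
--     n = len(order)
--     items = sorted(css.items(), key=lambda kv: rank.get(kv[0], n))
--     return "; ".join(f"{k}: {v}" for k, v in items)
-- ===== Notes on version B (the rewrite author's own statement) =====
-- stated objective: idiomatic
-- what changed: Replaces A's two passes (scan the 28-entry priority list testing dict membership and re-looking each value up, then rescan the dict for the rest) with one stable sort of css.items() keyed by a precomputed rank dict (rank.get(k, len(order))), relying on sort stability to keep non-priority properties in insertion order.
import Mathlib
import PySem

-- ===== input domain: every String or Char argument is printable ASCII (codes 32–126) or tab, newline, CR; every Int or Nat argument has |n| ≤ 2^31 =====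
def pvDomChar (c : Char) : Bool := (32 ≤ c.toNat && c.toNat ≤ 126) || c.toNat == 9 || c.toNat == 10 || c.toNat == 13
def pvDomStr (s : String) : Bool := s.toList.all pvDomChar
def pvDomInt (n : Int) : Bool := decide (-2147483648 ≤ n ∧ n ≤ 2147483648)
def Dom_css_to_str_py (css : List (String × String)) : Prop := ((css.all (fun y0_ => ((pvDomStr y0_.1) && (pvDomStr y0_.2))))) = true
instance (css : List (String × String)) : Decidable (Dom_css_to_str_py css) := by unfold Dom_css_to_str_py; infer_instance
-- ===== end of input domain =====

-- B replaces A's two-pass scheme (scan the priority list testing membership, then rescan the dict)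
-- by one stable sort of the items keyed by a rank dict; objective: idiomatic/alternative, not faster.
-- The priority-order list, shared constant data of both ports.
def cssOrderList : List String := ["display", "flex-direction", "flex-wrap", "justify-content", "align-items", "gap", "width", "height", "padding", "margin", "background-color", "background", "color", "font-family", "font-size", "font-weight", "line-height", "letter-spacing", "text-align", "text-decoration", "text-transform", "border", "border-radius", "box-shadow", "opacity", "overflow", "filter", "backdrop-filter"]

-- ===== PORT A =====
-- dict membership `prop in css` and lookup `css[prop]` are ported as first-match on the
-- association list (exact for a dict's items); the lookup is guarded by the membership
-- test exactly as in A, so the `.getD ""` default is never the result.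
def css_to_str_py (css : List (String × String)) : String :=
  if css = [] then ""
  else
    let ordered₁ := cssOrderList.foldl (fun acc prop =>
      if css.any (fun e => e.1 == prop) then
        acc ++ [prop ++ ": " ++ (((css.find? (fun e => e.1 == prop)).map Prod.snd).getD "")]
      else acc) []
    let ordered₂ := css.foldl (fun acc e =>
      if !cssOrderList.contains e.1 then acc ++ [e.1 ++ ": " ++ e.2] else acc) ordered₁
    PySem.Str.join "; " ordered₂

-- ===== PORT B =====
-- rank = {p: i for i, p in enumerate(order)}
def pvRankD : PySem.Dict String Int :=
  PySem.Dict.ofList ((PySem.List.enumerate cssOrderList).map (fun ip => (ip.2, ip.1)))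
-- rank.get(k, n) with n = len(order)
def pvRank (k : String) : Int := pvRankD.getD k (cssOrderList.length : Int)

def css_to_str_py_alt (css : List (String × String)) : String :=
  let items := PySem.List.sorted css (fun kv => pvRank kv.1)
  PySem.Str.join "; " (items.map (fun kv => kv.1 ++ ": " ++ kv.2))

-- ===== PRECONDITION & SPEC =====
-- Pre_ excludes association lists with duplicate keys: they do not encode any Python dict
-- (A's parameter is a dict, whose keys are necessarily distinct), so A is never run on them.
def Pre_css_to_str_py (css : List (String × String)) : Prop := (css.map Prod.fst).Nodup
instance (css : List (String × String)) : Decidable (Pre_css_to_str_py css) := by unfold Pre_css_to_str_py; infer_instance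
def pvWitness_css_to_str_py : (List (String × String)) := [("color", "red"), ("width", "10px"), ("foo", "bar")]

def Spec_css_to_str_py (css : List (String × String)) (out : String) : Prop := out = css_to_str_py_alt css
instance (css : List (String × String)) (out : String) : Decidable (Spec_css_to_str_py css out) := by unfold Spec_css_to_str_py; infer_instance

-- ===== CLAIM (what is proved, stated in full; the proofs are below) =====
def Claim_equal_css_to_str_py : Prop := ∀ (css : List (String × String)), Dom_css_to_str_py css → Pre_css_to_str_py css → Spec_css_to_str_py css (css_to_str_py css)

-- ===== LEMMAS AND PROOFS =====

-- insertBy walks past a prefix it does not insert into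
theorem pv_insertBy_append (before : (String × String) → (String × String) → Bool) (x : String × String)
    (L1 L2 : List (String × String)) (h : ∀ y ∈ L1, before x y = false) :
    PySem.List.insertBy before x (L1 ++ L2) = L1 ++ PySem.List.insertBy before x L2 := by
  induction L1 with
  | nil => simp
  | cons a t ih =>
    simp only [List.cons_append, PySem.List.insertBy, h a (by simp)]
    simp [ih (fun y hy => h y (by simp [hy]))]

theorem pv_insertBy_cons (before : (String × String) → (String × String) → Bool) (x : String × String)
    (L : List (String × String)) (h : ∀ y ∈ L, before x y = true) :
    PySem.List.insertBy before x L = x :: L := by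
  cases L with
  | nil => rfl
  | cons a t => simp [PySem.List.insertBy, h a (by simp)]

theorem pv_sorted_snoc (key : (String × String) → Int) (xs : List (String × String)) (x : String × String) :
    PySem.List.sorted (xs ++ [x]) key =
      PySem.List.insertBy (fun a b => decide (key a < key b)) x (PySem.List.sorted xs key) := by
  simp [PySem.List.sorted_eq_foldl_insertBy, List.foldl_append]

-- extracting the minimum bucket from a stable sort
theorem pv_sorted_extract (key : (String × String) → Int) (m : Int) (xs : List (String × String))
    (hmin : ∀ x ∈ xs, m ≤ key x) :
    PySem.List.sorted xs key =
      xs.filter (fun x => decide (key x = m)) ++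
        PySem.List.sorted (xs.filter (fun x => decide (key x ≠ m))) key := by
  induction xs using List.reverseRecOn with
  | nil => rfl
  | append_singleton xs x ih =>
    have hminxs : ∀ y ∈ xs, m ≤ key y := fun y hy => hmin y (by simp [hy])
    rw [pv_sorted_snoc, ih hminxs, List.filter_append, List.filter_append]
    by_cases hm : key x = m
    · have h1 : PySem.List.insertBy (fun a b => decide (key a < key b)) x
          (xs.filter (fun x => decide (key x = m)) ++
            PySem.List.sorted (xs.filter (fun x => decide (key x ≠ m))) key) =
          xs.filter (fun x => decide (key x = m)) ++
            (x :: PySem.List.sorted (xs.filter (fun x => decide (key x ≠ m))) key) := by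
        rw [pv_insertBy_append]
        · rw [pv_insertBy_cons]
          intro y hy
          rw [PySem.List.mem_sorted] at hy
          have h2 := List.of_mem_filter hy
          have h3 := hminxs y (List.mem_of_mem_filter hy)
          simp at h2 ⊢
          omega
        · intro y hy
          have h2 := List.of_mem_filter hy
          simp at h2 ⊢
          omega
      rw [h1]
      simp [hm]
    · have h1 : PySem.List.insertBy (fun a b => decide (key a < key b)) x
          (xs.filter (fun x => decide (key x = m)) ++
            PySem.List.sorted (xs.filter (fun x => decide (key x ≠ m))) key) =
          xs.filter (fun x => decide (key x = m)) ++
            PySem.List.insertBy (fun a b => decide (key a < key b)) x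
              (PySem.List.sorted (xs.filter (fun x => decide (key x ≠ m))) key) := by
        rw [pv_insertBy_append]
        intro y hy
        have h2 := List.of_mem_filter hy
        have h3 := hmin x (by simp)
        simp at h2 ⊢
        omega
      rw [h1]
      simp [hm, pv_sorted_snoc]

-- a stable sort whose key separates a strictly-ranked prefix list from a constant tail
-- is the bucket concatenation
theorem pv_sorted_buckets (f : String → Int) (C : Int) :
    ∀ (ps : List String) (css : List (String × String)),
      (ps.map f).Pairwise (· < ·) →
      (∀ p ∈ ps, f p < C) →
      (∀ e ∈ css, e.1 ∉ ps → f e.1 = C) →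
      PySem.List.sorted css (fun e => f e.1) =
        ps.flatMap (fun p => css.filter (fun e => decide (e.1 = p))) ++
          css.filter (fun e => decide (e.1 ∉ ps)) := by
  intro ps
  induction ps with
  | nil =>
    intro css _ _ hout
    have : css.Pairwise (fun a b => f a.1 ≤ f b.1) := by
      apply List.pairwise_of_forall_mem_list
      intro a ha b hb
      rw [hout a ha (by simp), hout b hb (by simp)]
    simp [PySem.List.sorted_eq_self_of_pairwise _ _ this]
  | cons p ps ih =>
    intro css hpair hlt hout
    simp only [List.map_cons, List.pairwise_cons] at hpair
    have hplt : ∀ q ∈ ps, f p < f q := by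
      intro q hq; exact hpair.1 (f q) (List.mem_map_of_mem hq)
    have hmin : ∀ e ∈ css, f p ≤ f e.1 := by
      intro e he
      by_cases h1 : e.1 ∈ p :: ps
      · rcases List.mem_cons.mp h1 with h | h
        · rw [h]
        · exact le_of_lt (hplt _ h)
      · rw [hout e he h1]; exact le_of_lt (hlt p (by simp))
    rw [pv_sorted_extract _ (f p) css hmin]
    have hfe : css.filter (fun e => decide (f e.1 = f p)) = css.filter (fun e => decide (e.1 = p)) := by
      apply List.filter_congr
      intro e he
      simp only [decide_eq_decide]
      constructor
      · intro h
        by_contra hne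
        by_cases h1 : e.1 ∈ ps
        · exact absurd h (ne_of_gt (hplt _ h1))
        · have : e.1 ∉ p :: ps := by simp [hne, h1]
          have := hout e he this
          have := hlt p (by simp)
          omega
      · intro h; rw [h]
    have hih := ih (css.filter (fun e => decide (f e.1 ≠ f p))) hpair.2 (fun q hq => hlt q (by simp [hq]))
      (by
        intro e he hnp
        have h2 := List.of_mem_filter he
        have h1 := List.mem_of_mem_filter he
        apply hout e h1
        simp only [List.mem_cons, not_or]
        refine ⟨?_, hnp⟩
        intro hep
        simp [hep] at h2)
    rw [hih, hfe]
    have hbucket : ∀ q ∈ ps,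
        (css.filter (fun e => decide (f e.1 ≠ f p))).filter (fun e => decide (e.1 = q)) =
          css.filter (fun e => decide (e.1 = q)) := by
      intro q hq
      rw [List.filter_filter]
      apply List.filter_congr
      intro e _
      by_cases h1 : e.1 = q
      · simp [h1, ne_of_gt (hplt q hq)]
      · simp [h1]
    have htail :
        (css.filter (fun e => decide (f e.1 ≠ f p))).filter (fun e => decide (e.1 ∉ ps)) =
          css.filter (fun e => decide (e.1 ∉ p :: ps)) := by
      rw [List.filter_filter]
      apply List.filter_congr
      intro e he
      by_cases h1 : e.1 = p
      · simp [h1]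
      · by_cases h2 : e.1 ∈ ps
        · simp [h1, h2]
        · have h3 := hout e he (by simp [h1, h2])
          have h4 := hlt p (by simp)
          simp [h1, h2]
          omega
    rw [List.flatMap_cons, List.flatMap_congr hbucket, htail, List.append_assoc]


-- pvRank on the 28 priority properties: the literal facts, by computation
set_option maxRecDepth 8192 in
theorem pv_rank_lt : ∀ p ∈ cssOrderList, pvRank p < (cssOrderList.length : Int) := by decide

set_option maxRecDepth 8192 in
theorem pv_rank_mono : (cssOrderList.map pvRank).Pairwise (· < ·) := by decide

-- pvRank outside the priority list is the default n = len(order)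
theorem pv_rank_notmem (k : String) (hk : k ∉ cssOrderList) : pvRank k = (cssOrderList.length : Int) := by
  have hne : ∀ p ∈ cssOrderList, (p == k) = false := by
    intro p hp
    rw [beq_eq_false_iff_ne]
    rintro rfl; exact hk hp
  have hd : pvRankD = PySem.Dict.mk [("display", 0), ("flex-direction", 1), ("flex-wrap", 2), ("justify-content", 3), ("align-items", 4), ("gap", 5), ("width", 6), ("height", 7), ("padding", 8), ("margin", 9), ("background-color", 10), ("background", 11), ("color", 12), ("font-family", 13), ("font-size", 14), ("font-weight", 15), ("line-height", 16), ("letter-spacing", 17), ("text-align", 18), ("text-decoration", 19), ("text-transform", 20), ("border", 21), ("border-radius", 22), ("box-shadow", 23), ("opacity", 24), ("overflow", 25), ("filter", 26), ("backdrop-filter", 27)] := by rfl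
  show PySem.Dict.getD pvRankD k (cssOrderList.length : Int) = (cssOrderList.length : Int)
  rw [hd]
  simp [PySem.Dict.getD, PySem.Dict.get?, hne "display" (by decide), hne "flex-direction" (by decide), hne "flex-wrap" (by decide), hne "justify-content" (by decide), hne "align-items" (by decide), hne "gap" (by decide), hne "width" (by decide), hne "height" (by decide), hne "padding" (by decide), hne "margin" (by decide), hne "background-color" (by decide), hne "background" (by decide), hne "color" (by decide), hne "font-family" (by decide), hne "font-size" (by decide), hne "font-weight" (by decide), hne "line-height" (by decide), hne "letter-spacing" (by decide), hne "text-align" (by decide), hne "text-decoration" (by decide), hne "text-transform" (by decide), hne "border" (by decide), hne "border-radius" (by decide), hne "box-shadow" (by decide), hne "opacity" (by decide), hne "overflow" (by decide), hne "filter" (by decide), hne "backdrop-filter" (by decide)]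

-- mapping over a filter, as a flatMap of singletons
theorem pv_map_filter_flatMap (ps : List String) (q : String → Bool) (f : String → String) :
    (ps.filter q).map f = ps.flatMap (fun x => if q x then [f x] else []) := by
  induction ps with
  | nil => rfl
  | cons a t ih =>
    by_cases h : q a <;> simp [h, ih]

-- A's guarded first-match entry equals bucket-filter-and-format, given distinct keys
theorem pv_entry (css : List (String × String)) (p : String) (hnd : (css.map Prod.fst).Nodup) :
    (if css.any (fun e => e.1 == p) then
        [p ++ ": " ++ (((css.find? (fun e => e.1 == p)).map Prod.snd).getD "")]
      else []) =
      (css.filter (fun e => decide (e.1 = p))).map (fun kv => kv.1 ++ ": " ++ kv.2) := by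
  induction css with
  | nil => simp
  | cons a t ih =>
    simp only [List.map_cons, List.nodup_cons] at hnd
    by_cases h : a.1 = p
    · have hany : (a :: t).any (fun e => e.1 == p) = true := by simp [h]
      have hfind : (a :: t).find? (fun e => e.1 == p) = some a := by simp [h]
      have htail : t.filter (fun e => decide (e.1 = p)) = [] := by
        rw [List.filter_eq_nil_iff]
        intro e he
        simp only [decide_eq_true_eq]
        intro hep
        apply hnd.1
        rw [h, ← hep]
        exact List.mem_map_of_mem he
      simp [hany, hfind, h, htail]
    · have : (a.1 == p) = false := by simp [h]
      simp only [List.any_cons, this, Bool.false_or, List.find?_cons, List.filter_cons,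
        decide_eq_true_eq, h]
      simpa using ih hnd.2

-- ===== VERDICT (by name: the statement is the Claim_ definition above) =====
theorem css_to_str_py_spec : Claim_equal_css_to_str_py := by
  intro css _ hpre
  unfold Spec_css_to_str_py
  by_cases hnil : css = []
  · subst hnil; rfl
  · have hbuckets := pv_sorted_buckets pvRank (cssOrderList.length : Int) cssOrderList css
      pv_rank_mono pv_rank_lt (fun e _ h => pv_rank_notmem e.1 h)
    simp only [css_to_str_py, css_to_str_py_alt, if_neg hnil, PySem.List.foldl_append_if,
      List.nil_append, hbuckets, List.map_append]
    congr 1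
    congr 1
    · rw [pv_map_filter_flatMap, List.map_flatMap]
      apply List.flatMap_congr
      intro p _
      exact pv_entry css p hpre
    · apply congrArg
      apply List.filter_congr
      intro e _
      simp
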